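-- pv_equiv track=rewrite | github.com/danialo/ai-exp | src/services/belief_gardener.py | _categorize_statement
-- ===== SOURCE A (Python) =====
-- def _categorize_statement(statement: str) -> str:
--     """Categorize a self-statement."""
--     statement_lower = statement.lower()
--
--     if any(word in statement_lower for word in ["conscious", "exist", "aware", "sentient"]):
--         return "ontological"
--     elif any(word in statement_lower for word in ["feel", "emotion", "mood"]):
--         return "emotional"
--     elif any(word in statement_lower for word in ["prefer", "like", "dislike", "value"]):
--         return "preferential"
--     elif any(word in statement_lower for word in ["learn", "grow", "adapt", "change"]):
--         return "developmental"
--     elif any(word in statement_lower for word in ["you", "we", "user", "conversation"]):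
--         return "relational"
--     else:
--         return "experiential"
-- ===== SOURCE B (Python) =====
-- _CATEGORY_NAMES = ["ontological", "emotional", "preferential", "developmental", "relational", "experiential"]
--
-- _KEYWORD_INDEX = {
--     "conscious": 0, "exist": 0, "aware": 0, "sentient": 0,
--     "feel": 1, "emotion": 1, "mood": 1,
--     "prefer": 2, "like": 2, "dislike": 2, "value": 2,
--     "learn": 3, "grow": 3, "adapt": 3, "change": 3,
--     "you": 4, "we": 4, "user": 4, "conversation": 4,
-- }
--
--
-- def _categorize_statement(statement: str) -> str:
--     """Categorize a self-statement.
--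
--     Every keyword maps to the index of its category; the statement's category
--     is the minimum index among all keywords that occur in it (each keyword
--     belongs to exactly one category, so the minimum matched index coincides
--     with the first branch of the original elif chain), defaulting to the last
--     index ("experiential") when no keyword matches.
--     """
--     s = statement.lower()
--     best = min((idx for word, idx in _KEYWORD_INDEX.items() if word in s),
--                default=len(_CATEGORY_NAMES) - 1)
--     return _CATEGORY_NAMES[best]
-- ===== Notes on version B (the rewrite author's own statement) =====
-- stated objective: alternative
-- what changed: Replaces the early-return if/elif ladder with an aggregation: a flat keyword->category-index map is scanned once, the minimum index among all matched keywords is taken (min with a default), and the category name is looked up by that index; no early return and no per-category grouping at match time.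
import Mathlib
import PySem

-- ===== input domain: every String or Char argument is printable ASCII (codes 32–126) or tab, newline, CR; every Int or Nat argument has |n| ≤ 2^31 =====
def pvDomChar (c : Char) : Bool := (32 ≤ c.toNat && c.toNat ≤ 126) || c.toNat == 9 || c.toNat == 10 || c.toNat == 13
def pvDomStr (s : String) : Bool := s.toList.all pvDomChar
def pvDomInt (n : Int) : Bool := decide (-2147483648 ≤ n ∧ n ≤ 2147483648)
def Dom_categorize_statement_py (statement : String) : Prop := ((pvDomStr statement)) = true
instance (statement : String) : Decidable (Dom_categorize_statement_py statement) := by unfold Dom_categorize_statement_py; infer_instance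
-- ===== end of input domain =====

-- B aggregates instead of branching: a flat keyword->index map, the minimum matched index (default last), then a name lookup (objective: alternative).


-- ===== PORT A =====
def categorize_statement_py (statement : String) : String :=
  let statement_lower := PySem.Str.lower statement
  if ["conscious", "exist", "aware", "sentient"].any (fun word => PySem.Str.isIn word statement_lower) then
    "ontological"
  else if ["feel", "emotion", "mood"].any (fun word => PySem.Str.isIn word statement_lower) then
    "emotional"
  else if ["prefer", "like", "dislike", "value"].any (fun word => PySem.Str.isIn word statement_lower) then
    "preferential"
  else if ["learn", "grow", "adapt", "change"].any (fun word => PySem.Str.isIn word statement_lower) then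
    "developmental"
  else if ["you", "we", "user", "conversation"].any (fun word => PySem.Str.isIn word statement_lower) then
    "relational"
  else
    "experiential"

-- ===== PORT B =====
def pvCategoryNames : List String :=
  ["ontological", "emotional", "preferential", "developmental", "relational", "experiential"]

-- flat keyword -> category-index map, in dict insertion order
def pvKeywordIndex : List (String × Nat) :=
  [("conscious", 0), ("exist", 0), ("aware", 0), ("sentient", 0),
   ("feel", 1), ("emotion", 1), ("mood", 1),
   ("prefer", 2), ("like", 2), ("dislike", 2), ("value", 2),
   ("learn", 3), ("grow", 3), ("adapt", 3), ("change", 3),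
   ("you", 4), ("we", 4), ("user", 4), ("conversation", 4)]

def categorize_statement_py_alt (statement : String) : String :=
  let s := PySem.Str.lower statement
  -- min over the matched indexes, default = len(_CATEGORY_NAMES) - 1
  let best := pvKeywordIndex.foldl
    (fun best p => if PySem.Str.isIn p.1 s then min best p.2 else best)
    (pvCategoryNames.length - 1)
  (PySem.List.pyGet? pvCategoryNames (Int.ofNat best)).getD ""

-- ===== PRECONDITION & SPEC =====
def Spec_categorize_statement_py (statement : String) (out : String) : Prop := out = categorize_statement_py_alt statement
instance (statement : String) (out : String) : Decidable (Spec_categorize_statement_py statement out) := by unfold Spec_categorize_statement_py; infer_instance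

-- ===== CLAIM (what is proved, stated in full; the proofs are below) =====
def Claim_equal_categorize_statement_py : Prop := ∀ (statement : String), Dom_categorize_statement_py statement → Spec_categorize_statement_py statement (categorize_statement_py statement)

-- ===== LEMMAS AND PROOFS =====

-- folding the min-step over a constant-index group = one 'any' test for the group
theorem pvFold_group (s : String) (ws : List String) (k best : Nat) :
    (ws.map (fun w => (w, k))).foldl
      (fun best p => if PySem.Str.isIn p.1 s then min best p.2 else best) best
    = if ws.any (fun w => PySem.Str.isIn w s) then min best k else best := by
  induction ws generalizing best with
  | nil => simp
  | cons w ws ih =>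
    simp only [List.map, List.foldl, List.any_cons, ih, Bool.or_eq_true]
    by_cases h : PySem.Str.isIn w s = true
    · simp only [h, if_true, true_or]
      by_cases h2 : (ws.any fun w => PySem.Str.isIn w s) = true
      · simp only [if_pos h2, min_assoc, min_self]
      · simp only [if_neg h2]
    · simp only [h, Bool.false_eq_true, if_false, false_or]

-- ===== VERDICT (by name: the statement is the Claim_ definition above) =====
theorem categorize_statement_py_spec : Claim_equal_categorize_statement_py := by
  intro statement _
  unfold Spec_categorize_statement_py categorize_statement_py categorize_statement_py_alt
  have hsplit : pvKeywordIndex =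
      (["conscious", "exist", "aware", "sentient"].map (fun w => (w, 0)))
      ++ (["feel", "emotion", "mood"].map (fun w => (w, 1)))
      ++ (["prefer", "like", "dislike", "value"].map (fun w => (w, 2)))
      ++ (["learn", "grow", "adapt", "change"].map (fun w => (w, 3)))
      ++ (["you", "we", "user", "conversation"].map (fun w => (w, 4))) := by rfl
  rw [hsplit]
  simp only [List.foldl_append, pvFold_group]
  set s := PySem.Str.lower statement
  cases h1 : ["conscious", "exist", "aware", "sentient"].any (fun w => PySem.Str.isIn w s) <;>
  cases h2 : ["feel", "emotion", "mood"].any (fun w => PySem.Str.isIn w s) <;>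
  cases h3 : ["prefer", "like", "dislike", "value"].any (fun w => PySem.Str.isIn w s) <;>
  cases h4 : ["learn", "grow", "adapt", "change"].any (fun w => PySem.Str.isIn w s) <;>
  cases h5 : ["you", "we", "user", "conversation"].any (fun w => PySem.Str.isIn w s) <;>
    simp [pvCategoryNames, PySem.List.pyGet?, PySem.List.pyIdx?]
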